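-- pv_equiv track=rewrite | github.com/Cicero-Henrique/Light-Side | cupp.py | birthday_combinations
-- ===== SOURCE A (Python) =====
-- def birthday_combinations(birthday_slices):
--     birthday_comb = []
--     for aux1 in birthday_slices:
--         birthday_comb.append(aux1)
--         for aux2 in birthday_slices:
--             if birthday_slices.index(aux1) != birthday_slices.index(aux2):
--                 birthday_comb.append(aux1 + aux2)
--                 for aux3 in birthday_slices:
--                     if (
--                         birthday_slices.index(aux1) != birthday_slices.index(aux2)
--                         and birthday_slices.index(aux2) != birthday_slices.index(aux3)
--                         and birthday_slices.index(aux1) != birthday_slices.index(aux3)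
--                     ):
--                         birthday_comb.append(aux1 + aux2 + aux3)
--
--     return birthday_comb
-- ===== SOURCE B (Python) =====
-- def birthday_combinations(birthday_slices):
--     result = []
--
--     def extend(current, used, depth):
--         result.append(current)
--         if depth < 3:
--             for e in birthday_slices:
--                 if e not in used:
--                     extend(current + e, used | {e}, depth + 1)
--
--     for e in birthday_slices:
--         extend(e, {e}, 1)
--     return result
-- ===== Notes on version B (the rewrite author's own statement) =====
-- stated objective: alternative
-- what changed: Replaces the three hard-coded nested loops with repeated list.index comparisons by a recursive DFS helper that extends the current concatenation with each element whose value is not in a 'used' set, appending at every depth up to 3.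
import Mathlib
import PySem

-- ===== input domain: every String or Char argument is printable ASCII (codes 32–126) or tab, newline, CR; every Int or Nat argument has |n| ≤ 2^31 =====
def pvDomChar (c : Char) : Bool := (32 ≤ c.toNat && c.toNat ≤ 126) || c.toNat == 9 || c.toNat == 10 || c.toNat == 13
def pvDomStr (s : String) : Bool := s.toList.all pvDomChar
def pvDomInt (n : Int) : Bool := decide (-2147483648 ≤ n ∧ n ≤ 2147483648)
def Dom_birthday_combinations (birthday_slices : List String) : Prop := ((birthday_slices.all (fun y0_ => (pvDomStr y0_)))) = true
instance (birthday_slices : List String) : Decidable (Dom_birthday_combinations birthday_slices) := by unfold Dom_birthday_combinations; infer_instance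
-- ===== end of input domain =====

-- B replaces A's triple nested loop with repeated list.index tests by a recursive
-- DFS that extends a prefix with elements whose value is not yet used (objective: alternative).

-- ===== PORT A =====
def birthday_combinations (birthday_slices : List String) : List String :=
  birthday_slices.foldl (fun acc aux1 =>
    birthday_slices.foldl (fun acc aux2 =>
      if PySem.List.index? birthday_slices aux1 ≠ PySem.List.index? birthday_slices aux2 then
        birthday_slices.foldl (fun acc aux3 =>
          if PySem.List.index? birthday_slices aux1 ≠ PySem.List.index? birthday_slices aux2 ∧
             PySem.List.index? birthday_slices aux2 ≠ PySem.List.index? birthday_slices aux3 ∧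
             PySem.List.index? birthday_slices aux1 ≠ PySem.List.index? birthday_slices aux3
          then acc ++ [aux1 ++ aux2 ++ aux3] else acc)
          (acc ++ [aux1 ++ aux2])
      else acc)
      (acc ++ [aux1])) []

-- ===== PORT B =====
-- 'extend' from Source B; Python's ascending depth with 'depth < 3' is carried as remaining depth (3 - depth).
def bcExtend (birthday_slices : List String) : Nat → List String → String → PySem.Set String → List String
  | 0, acc, cur, _ => acc ++ [cur]
  | Nat.succ rem, acc, cur, used =>
      birthday_slices.foldl (fun acc e =>
        if PySem.Set.contains used e then acc
        else bcExtend birthday_slices rem acc (cur ++ e) (PySem.Set.add used e))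
        (acc ++ [cur])

def birthday_combinations_alt (birthday_slices : List String) : List String :=
  birthday_slices.foldl (fun acc e =>
    bcExtend birthday_slices 2 acc e (PySem.Set.add PySem.Set.empty e)) []

-- ===== PRECONDITION & SPEC =====
def Spec_birthday_combinations (birthday_slices : List String) (out : List String) : Prop := out = birthday_combinations_alt birthday_slices
instance (birthday_slices : List String) (out : List String) : Decidable (Spec_birthday_combinations birthday_slices out) := by unfold Spec_birthday_combinations; infer_instance

-- ===== CLAIM (what is proved, stated in full; the proofs are below) =====
def Claim_equal_birthday_combinations : Prop := ∀ (birthday_slices : List String), Dom_birthday_combinations birthday_slices → Spec_birthday_combinations birthday_slices (birthday_combinations birthday_slices)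

-- ===== LEMMAS AND PROOFS =====

-- list.index compares by value: for a member a, equal first-indices means equal values.
theorem pv_index_eq_iff {L : List String} {a b : String} (ha : a ∈ L) :
    List.idxOf? a L = List.idxOf? b L ↔ a = b := by
  rw [← PySem.List.index?_eq_idxOf?, ← PySem.List.index?_eq_idxOf?]
  constructor
  · intro h
    obtain ⟨k, hk⟩ := Option.isSome_iff_exists.mp ((PySem.List.index?_isSome_iff L a).mpr ha)
    obtain ⟨hk1, hka, -⟩ := PySem.List.getElem_of_index?_eq_some hk
    obtain ⟨hk2, hkb, -⟩ := PySem.List.getElem_of_index?_eq_some (h ▸ hk)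
    rw [← hka, hkb]
  · intro h; rw [h]

theorem pv_level3 (L : List String) (aux1 aux2 : String) (h1 : aux1 ∈ L) (h2 : aux2 ∈ L)
    (hne : aux1 ≠ aux2) (acc : List String) :
    L.foldl (fun acc aux3 =>
        if PySem.List.index? L aux1 ≠ PySem.List.index? L aux2 ∧
           PySem.List.index? L aux2 ≠ PySem.List.index? L aux3 ∧
           PySem.List.index? L aux1 ≠ PySem.List.index? L aux3
        then acc ++ [aux1 ++ aux2 ++ aux3] else acc) acc
      = L.foldl (fun acc e =>
          if PySem.Set.contains (PySem.Set.add (PySem.Set.add PySem.Set.empty aux1) aux2) e then acc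
          else bcExtend L 0 acc ((aux1 ++ aux2) ++ e)
                 (PySem.Set.add (PySem.Set.add (PySem.Set.add PySem.Set.empty aux1) aux2) e)) acc := by
  apply PySem.List.foldl_congr_mem
  intro acc aux3 h3
  have hset : PySem.Set.add (PySem.Set.add PySem.Set.empty aux1) aux2 = [aux1, aux2] := by
    simp [PySem.Set.empty, hne.symm]
  rw [hset]
  simp only [PySem.List.index?_eq_idxOf?]
  by_cases e2 : aux3 = aux2
  · subst e2
    simp [PySem.Set.contains]
  · by_cases e1 : aux3 = aux1
    · subst e1
      simp [PySem.Set.contains]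
    · have i12 : ¬ List.idxOf? aux1 L = List.idxOf? aux2 L :=
        fun h => hne ((pv_index_eq_iff h1).mp h)
      have i23 : ¬ List.idxOf? aux2 L = List.idxOf? aux3 L :=
        fun h => e2 (((pv_index_eq_iff h2).mp h).symm)
      have i13 : ¬ List.idxOf? aux1 L = List.idxOf? aux3 L :=
        fun h => e1 (((pv_index_eq_iff h1).mp h).symm)
      simp [bcExtend, i12, i23, i13, PySem.Set.contains, e1, e2, String.append_assoc]

theorem pv_level2 (L : List String) (aux1 : String) (h1 : aux1 ∈ L) (acc : List String) :
    L.foldl (fun acc aux2 =>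
        if PySem.List.index? L aux1 ≠ PySem.List.index? L aux2 then
          L.foldl (fun acc aux3 =>
            if PySem.List.index? L aux1 ≠ PySem.List.index? L aux2 ∧
               PySem.List.index? L aux2 ≠ PySem.List.index? L aux3 ∧
               PySem.List.index? L aux1 ≠ PySem.List.index? L aux3
            then acc ++ [aux1 ++ aux2 ++ aux3] else acc)
            (acc ++ [aux1 ++ aux2])
        else acc) acc
      = L.foldl (fun acc e =>
          if PySem.Set.contains (PySem.Set.add PySem.Set.empty aux1) e then acc
          else bcExtend L 1 acc (aux1 ++ e) (PySem.Set.add (PySem.Set.add PySem.Set.empty aux1) e)) acc := by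
  apply PySem.List.foldl_congr_mem
  intro acc aux2 h2
  by_cases e1 : aux2 = aux1
  · subst e1
    simp [PySem.List.index?_eq_idxOf?, PySem.Set.contains, PySem.Set.empty]
  · have i12 : PySem.List.index? L aux1 ≠ PySem.List.index? L aux2 := by
      simp only [PySem.List.index?_eq_idxOf?]
      exact fun h => e1 (((pv_index_eq_iff h1).mp h).symm)
    have hc : PySem.Set.contains (PySem.Set.add PySem.Set.empty aux1) aux2 = false := by
      simp [PySem.Set.empty, PySem.Set.contains]
      exact e1
    rw [if_pos i12, hc]
    simp only [Bool.false_eq_true, if_false, bcExtend]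
    exact pv_level3 L aux1 aux2 h1 h2 (fun h => e1 h.symm) _

-- ===== VERDICT (by name: the statement is the Claim_ definition above) =====
theorem birthday_combinations_spec : Claim_equal_birthday_combinations := by
  intro L _
  unfold Spec_birthday_combinations birthday_combinations birthday_combinations_alt
  apply PySem.List.foldl_congr_mem
  intro acc aux1 h1
  simp only [bcExtend]
  exact pv_level2 L aux1 h1 _
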